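-- pv_equiv track=rewrite | github.com/mtmiller0417/CISC481Trains | program1.py | heruristic2
-- ===== SOURCE A (Python) =====
-- def heruristic2(state, end_state):
--     state_car_string = ""
--     end_state_car_string = ""
--     for track in state:
--         if track != None:
--             for car in track:
--                 if car != None:
--                     state_car_string += car
--     for track in end_state:
--         if track != None:
--             for car in track:
--                 if car != None:
--                     end_state_car_string += car
--     total_dist = 0
--     # Check the total distance that each car is out of place and add them up
--     for car_index in range(len(end_state_car_string)):
--         for i in range(len(state_car_string)):
--             if end_state_car_string[car_index] == state_car_string[i]:
--                 total_dist += abs(i - car_index)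
--     return total_dist
-- ===== SOURCE B (Python) =====
-- def heruristic2(state, end_state):
--     # Index every car-character's positions in the state string once,
--     # then a single pass over the end-state string sums the distances.
--     s = "".join(car for track in state if track is not None
--                     for car in track if car is not None)
--     e = "".join(car for track in end_state if track is not None
--                     for car in track if car is not None)
--     pos = {}
--     for i, ch in enumerate(s):
--         pos.setdefault(ch, []).append(i)
--     total = 0
--     for j, ch in enumerate(e):
--         for i in pos.get(ch, []):
--             total += abs(i - j)
--     return total
-- ===== Notes on version B (the rewrite author's own statement) =====
-- stated objective: alternative
-- what changed: B builds a dictionary mapping each car character to its positions in the state string in one pass, then a single pass over the end-state string sums distances from that index, removing A's rescan of the state string per end-state character (same worst-case cost when matches dominate).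
import Mathlib
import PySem

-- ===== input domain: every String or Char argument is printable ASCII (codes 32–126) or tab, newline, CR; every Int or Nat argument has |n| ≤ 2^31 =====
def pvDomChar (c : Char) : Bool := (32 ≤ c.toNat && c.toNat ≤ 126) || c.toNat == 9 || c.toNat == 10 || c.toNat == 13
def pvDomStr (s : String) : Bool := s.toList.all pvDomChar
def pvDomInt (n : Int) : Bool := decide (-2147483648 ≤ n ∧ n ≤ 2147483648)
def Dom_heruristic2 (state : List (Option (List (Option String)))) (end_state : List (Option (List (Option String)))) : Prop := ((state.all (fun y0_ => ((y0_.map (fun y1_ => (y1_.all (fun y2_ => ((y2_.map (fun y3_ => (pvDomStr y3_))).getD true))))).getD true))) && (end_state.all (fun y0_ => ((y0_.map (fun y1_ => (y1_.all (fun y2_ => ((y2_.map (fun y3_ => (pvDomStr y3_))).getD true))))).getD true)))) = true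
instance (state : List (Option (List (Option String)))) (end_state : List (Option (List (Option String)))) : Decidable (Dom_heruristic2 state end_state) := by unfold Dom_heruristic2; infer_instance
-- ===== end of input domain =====

-- B replaces A's rescan of the state string for every end-state character by a positions
-- dictionary built in one pass over the state string (objective: alternative; the summed
-- matching pairs dominate both when cars repeat).

-- ===== PORT A =====
-- state_car_string built by += over tracks and cars (strings as List Char)
def pvCarStringA (tracks : List (Option (List (Option String)))) : List Char :=
  tracks.foldl (fun acc track =>
    match track with
    | none => acc
    | some t => t.foldl (fun acc2 car =>
        match car with
        | none => acc2
        | some c => acc2 ++ c.toList) acc) []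

def heruristic2 (state : List (Option (List (Option String)))) (end_state : List (Option (List (Option String)))) : Int :=
  let state_car_string := pvCarStringA state
  let end_state_car_string := pvCarStringA end_state
  -- for car_index in range(len(end3)): for i in range(len(state)): if equal chars, total += abs(i - car_index)
  (PySem.List.pyRange 0 (end_state_car_string.length : Int)).foldl (fun total car_index =>
    (PySem.List.pyRange 0 (state_car_string.length : Int)).foldl (fun total i =>
      if PySem.List.pyGetD end_state_car_string car_index ' ' = PySem.List.pyGetD state_car_string i ' '
      then total + |i - car_index| else total) total) 0

-- ===== PORT B =====
-- "".join(car for track in tracks if track is not None for car in track if car is not None)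
def pvCarStringB (tracks : List (Option (List (Option String)))) : List Char :=
  PySem.Chars.join [] (tracks.flatMap (fun track =>
    match track with
    | none => []
    | some t => t.flatMap (fun car =>
        match car with
        | none => []
        | some c => [c.toList])))

def heruristic2_alt (state : List (Option (List (Option String)))) (end_state : List (Option (List (Option String)))) : Int :=
  let s := pvCarStringB state
  let e := pvCarStringB end_state
  -- pos.setdefault(ch, []).append(i)  ≡  in-place modify of the stored list (default [])
  let pos : PySem.Dict Char (List Int) :=
    (PySem.List.enumerate s).foldl (fun d p => d.modify p.2 [] (fun l => l ++ [p.1])) PySem.Dict.empty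
  (PySem.List.enumerate e).foldl (fun total p =>
    (pos.getD p.2 []).foldl (fun t i => t + |i - p.1|) total) 0

-- ===== PRECONDITION & SPEC =====
def Spec_heruristic2 (state : List (Option (List (Option String)))) (end_state : List (Option (List (Option String)))) (out : Int) : Prop := out = heruristic2_alt state end_state
instance (state : List (Option (List (Option String)))) (end_state : List (Option (List (Option String)))) (out : Int) : Decidable (Spec_heruristic2 state end_state out) := by unfold Spec_heruristic2; infer_instance

-- ===== CLAIM (what is proved, stated in full; the proofs are below) =====
def Claim_equal_heruristic2 : Prop := ∀ (state : List (Option (List (Option String)))) (end_state : List (Option (List (Option String)))), Dom_heruristic2 state end_state → Spec_heruristic2 state end_state (heruristic2 state end_state)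

-- ===== LEMMAS AND PROOFS =====

-- the two car-string builders collect the same characters
lemma join_nil_eq_flatten (L : List (List Char)) : PySem.Chars.join [] L = L.flatten := by
  induction L with
  | nil => rfl
  | cons h t ih =>
    cases t with
    | nil => simp [PySem.Chars.join, List.intercalate]
    | cons h2 t2 =>
      simp only [PySem.Chars.join, List.intercalate] at *
      simp [List.intersperse, List.flatten] at *
      simpa using ih

lemma carStringA_inner (cars : List (Option String)) (acc : List Char) :
    cars.foldl (fun acc2 car => match car with
      | none => acc2
      | some c => acc2 ++ c.toList) acc
    = acc ++ cars.flatMap (fun car => match car with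
      | none => ([] : List Char)
      | some c => c.toList) := by
  have h : (fun (acc2 : List Char) (car : Option String) => match car with
      | none => acc2
      | some c => acc2 ++ c.toList)
      = fun acc2 car => acc2 ++ (match car with
      | none => ([] : List Char)
      | some c => c.toList) := by
    funext acc2 car; cases car <;> simp
  rw [h, PySem.List.foldl_append_eq_flatMap]

lemma carString_eq (tracks : List (Option (List (Option String)))) :
    pvCarStringB tracks = pvCarStringA tracks := by
  unfold pvCarStringB pvCarStringA
  rw [join_nil_eq_flatten]
  have h : (fun (acc : List Char) (track : Option (List (Option String))) =>
      match track with
      | none => acc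
      | some t => t.foldl (fun acc2 car => match car with
          | none => acc2
          | some c => acc2 ++ c.toList) acc)
      = fun acc track => acc ++ (match track with
      | none => ([] : List Char)
      | some t => t.flatMap (fun car => match car with
          | none => ([] : List Char)
          | some c => c.toList)) := by
    funext acc track
    cases track with
    | none => simp
    | some t => simpa using carStringA_inner t acc
  rw [h, PySem.List.foldl_append_eq_flatMap]
  simp only [List.nil_append]
  induction tracks with
  | nil => rfl
  | cons hd tl ih =>
    cases hd with
    | none => simpa using ih
    | some t =>
      simp only [List.flatMap_cons, List.flatten_append, ih]
      congr 1
      induction t with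
      | nil => rfl
      | cons c cs ihc =>
        cases c <;> simp [ihc]

-- enumerate as an indexed map over range
lemma enumerate_eq_range_map (s : List Char) (k : Int) :
    PySem.List.enumerate s k
    = (List.range s.length).map (fun (i : Nat) => ((k + i : Int), s.getD i ' ')) := by
  induction s generalizing k with
  | nil => rfl
  | cons a t ih =>
    simp only [PySem.List.enumerate, ih, List.length_cons, List.range_succ_eq_map,
      List.map_cons, List.map_map]
    congr 1
    · simp
    apply List.map_congr_left
    intro i _
    simp only [Function.comp_apply, Nat.succ_eq_add_one, List.getD_cons_succ]
    congr 1
    push_cast; ring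

-- folding `if cond then acc + v else acc` is adding a guarded sum
lemma foldl_ite_add {β : Type} (l : List β) (P : β → Prop) [DecidablePred P] (v : β → Int) (a : Int) :
    l.foldl (fun t i => if P i then t + v i else t) a
    = a + (l.map (fun i => if P i then v i else 0)).sum := by
  have h : (fun (t : Int) i => if P i then t + v i else t)
      = fun t i => t + (if P i then v i else 0) := by
    funext t i; split <;> simp
  rw [h, PySem.List.foldl_add]

-- sum over a filtered list equals the guarded sum over the whole list
lemma sum_map_filter_eq (l : List Nat) (p : Nat → Bool) (f : Nat → Int) :
    ((l.filter p).map f).sum = (l.map (fun x => if p x then f x else 0)).sum := by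
  induction l with
  | nil => rfl
  | cons h t ih =>
    by_cases hp : p h <;> simp [hp, ih]

-- B's positions dictionary: the list of indices of c in s, in order
lemma pos_getD (s : List Char) (c : Char) :
    (((PySem.List.enumerate s).foldl (fun d p => d.modify p.2 [] (fun l => l ++ [p.1])) PySem.Dict.empty).getD c [])
    = ((PySem.List.enumerate s).filter (fun q => q.2 == c)).map (fun q => q.1) := by
  have h : (PySem.List.enumerate s).foldl (fun d p => d.modify p.2 [] (fun l => l ++ [p.1])) (PySem.Dict.empty : PySem.Dict Char (List Int))
      = ((PySem.List.enumerate s).map Prod.swap).foldl (fun d p => d.modify p.1 [] (fun l => l ++ [p.2])) PySem.Dict.empty := by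
    rw [List.foldl_map]
    congr 1
  rw [h, PySem.Dict.getD_foldl_modify_append]
  simp [List.filter_map, Function.comp_def, Prod.swap]

-- the heart: A's nested index scan equals B's dictionary pass, for any two char lists
lemma core_eq (s e : List Char) :
    (PySem.List.pyRange 0 (e.length : Int)).foldl (fun total car_index =>
      (PySem.List.pyRange 0 (s.length : Int)).foldl (fun total i =>
        if PySem.List.pyGetD e car_index ' ' = PySem.List.pyGetD s i ' '
        then total + |i - car_index| else total) total) 0
    =
    (PySem.List.enumerate e).foldl (fun total p =>
      ((((PySem.List.enumerate s).foldl (fun d p => d.modify p.2 [] (fun l => l ++ [p.1])) PySem.Dict.empty).getD p.2 []).foldl (fun t i => t + |i - p.1|) total)) 0 := by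
  -- A side to a guarded double sum over ranges
  rw [PySem.List.pyRange_zero_natCast (n := e.length), List.foldl_map]
  have hA : (fun (total : Int) (car_index : Nat) =>
      (PySem.List.pyRange 0 (s.length : Int)).foldl (fun total i =>
        if PySem.List.pyGetD e (car_index : Int) ' ' = PySem.List.pyGetD s i ' '
        then total + |i - (car_index : Int)| else total) total)
      = fun total j => total +
        ((List.range s.length).map (fun i =>
          if e.getD j ' ' = s.getD i ' ' then |(i : Int) - (j : Int)| else 0)).sum := by
    funext total j
    rw [PySem.List.pyRange_zero_natCast (n := s.length), List.foldl_map, foldl_ite_add]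
    congr 1
    apply congrArg
    apply List.map_congr_left
    intro i _
    simp [PySem.List.pyGetD_natCast]
  rw [hA, PySem.List.foldl_add, Int.zero_add]
  -- B side to a sum over enumerate
  simp only [pos_getD]
  have hB : (fun (total : Int) (p : Int × Char) =>
      (((PySem.List.enumerate s).filter (fun q => q.2 == p.2)).map (fun q => q.1)).foldl (fun t i => t + |i - p.1|) total)
      = fun total p => total +
        ((((PySem.List.enumerate s).filter (fun q => q.2 == p.2)).map (fun q => q.1)).map (fun i => |i - p.1|)).sum := by
    funext total p
    rw [PySem.List.foldl_add]
  rw [hB, PySem.List.foldl_add, Int.zero_add]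
  -- both are sums over range e.length; compare pointwise
  rw [enumerate_eq_range_map e 0, List.map_map]
  apply congrArg
  apply List.map_congr_left
  intro j _
  simp only [Function.comp_apply]
  -- fixed j: B's filtered positions vs A's guarded inner sum
  rw [enumerate_eq_range_map s 0, List.filter_map, List.map_map, List.map_map]
  rw [sum_map_filter_eq]
  apply congrArg
  apply List.map_congr_left
  intro i _
  simp only [Function.comp_apply]
  simp only [beq_iff_eq, zero_add]
  by_cases hc : e.getD j ' ' = s.getD i ' '
  · rw [if_pos hc, if_pos hc.symm]
  · rw [if_neg hc, if_neg (Ne.symm hc)]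

-- ===== VERDICT (by name: the statement is the Claim_ definition above) =====
theorem heruristic2_spec : Claim_equal_heruristic2 := by
  intro state end_state _
  unfold Spec_heruristic2 heruristic2 heruristic2_alt
  rw [carString_eq state, carString_eq end_state]
  exact core_eq (pvCarStringA state) (pvCarStringA end_state)
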